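-- pv_equiv track=rewrite | github.com/yeojeongkim/009 | mines.py | get_all_coords
-- ===== SOURCE A (Python) =====
-- def get_all_coords(dimensions):
--     """
--     Given the dimensions of a board, returns all possible coordinates
--     of the board in a set of tuples.
--     """
--     all_coords = set()
--     if len(dimensions) == 1:
--         for coord in range(dimensions[0]):
--             all_coords.add((coord,))
--     else:
--         for x in get_all_coords((dimensions[0],)):
--             for i in get_all_coords(dimensions[1:]):
--                 all_coords.add(x + i)
--     return all_coords
-- ===== SOURCE B (Python) =====
-- def get_all_coords(dimensions):
--     """
--     Given the dimensions of a board, returns all possible coordinates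
--     of the board in a set of tuples.
--     """
--     if min(dimensions) < 1:
--         return set()  # a dimension without cells: the board has no coordinates
--     coords = {(c,) for c in range(dimensions[-1])}
--     for d in reversed(dimensions[:-1]):
--         singles = {(c,) for c in range(d)}
--         coords = {s + t for s in singles for t in coords}
--     return coords
-- ===== Notes on version B (the rewrite author's own statement) =====
-- stated objective: alternative
-- what changed: Replaced the tree recursion (recursing on both the head singleton and the tail) with an early empty-board short-circuit for a nonpositive dimension plus a single iterative right-to-left fold over the dimensions that extends an accumulator set of suffix tuples by each one-coordinate prefix; Pre_ excludes only the empty dimension list, on which A raises IndexError and B raises ValueError.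
import Mathlib
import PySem

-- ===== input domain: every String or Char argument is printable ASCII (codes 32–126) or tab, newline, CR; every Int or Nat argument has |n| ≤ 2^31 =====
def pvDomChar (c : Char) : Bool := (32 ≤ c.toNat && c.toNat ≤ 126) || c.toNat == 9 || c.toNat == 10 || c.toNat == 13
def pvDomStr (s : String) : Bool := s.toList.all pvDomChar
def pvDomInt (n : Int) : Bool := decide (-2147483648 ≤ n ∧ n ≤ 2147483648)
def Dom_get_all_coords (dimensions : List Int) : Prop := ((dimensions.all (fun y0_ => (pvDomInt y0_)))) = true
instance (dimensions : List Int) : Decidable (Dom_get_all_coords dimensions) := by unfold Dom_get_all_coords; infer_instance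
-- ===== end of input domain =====

-- B builds the Cartesian product by one iterative right-to-left fold over the dimensions instead of A's tree recursion; return value only.

-- ===== PORT A =====
-- A recurses: base case a single dimension; otherwise combine get_all_coords((d0,)) with get_all_coords(dimensions[1:]).
def get_all_coords (dimensions : List Int) : List (List Int) :=
  match dimensions with
  | [] => []            -- Python raises IndexError here (dimensions[0] in the recursive call); excluded by Pre_
  | [d] =>
      -- for coord in range(d): all_coords.add((coord,))
      (PySem.List.pyRange 0 d 1).foldl (fun s c => PySem.Set.add s [c]) PySem.Set.empty
  | d :: e :: rest =>
      -- for x in get_all_coords((d,)): for i in get_all_coords(dimensions[1:]): all_coords.add(x + i)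
      (get_all_coords [d]).foldl
        (fun s x => (get_all_coords (e :: rest)).foldl (fun s i => PySem.Set.add s (x ++ i)) s)
        PySem.Set.empty
termination_by dimensions.length
decreasing_by all_goals (simp; try omega)

-- ===== PORT B =====
-- if min(dimensions) < 1: return set()
-- coords = {(c,) for c in range(dimensions[-1])}
-- for d in reversed(dimensions[:-1]): singles = {(c,) for c in range(d)}; coords = {s + t for s in singles for t in coords}
-- return coords
-- (a Set's list is its insertion order; the comprehensions insert in exactly that order)
def get_all_coords_alt (dimensions : List Int) : List (List Int) :=
  match dimensions with
  | [] => []            -- Python raises ValueError here (min of an empty sequence); excluded by Pre_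
  | d0 :: rest =>
  if rest.foldl min d0 < 1 then []   -- min(dimensions) < 1
  else
  match (d0 :: rest).reverse with
  | [] => []            -- unreachable: dimensions is nonempty
  | dlast :: revInit =>  -- dimensions[-1] = dlast, reversed(dimensions[:-1]) = revInit
    revInit.foldl
      (fun coords d =>
        PySem.Set.ofList
          ((PySem.Set.ofList ((PySem.List.pyRange 0 d 1).map (fun c => [c]))).flatMap
            (fun s => coords.map (fun t => s ++ t))))
      (PySem.Set.ofList ((PySem.List.pyRange 0 dlast 1).map (fun c => [c])))

-- ===== PRECONDITION & SPEC =====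
-- Both programs raise on the empty list (A an IndexError from dimensions[0], B a ValueError from min); Pre_ excludes exactly that input.
def Pre_get_all_coords (dimensions : List Int) : Prop := dimensions ≠ []
instance (dimensions : List Int) : Decidable (Pre_get_all_coords dimensions) := by unfold Pre_get_all_coords; infer_instance
def pvWitness_get_all_coords : List Int := [2, 3]

def Spec_get_all_coords (dimensions : List Int) (out : List (List Int)) : Prop := out = get_all_coords_alt dimensions
instance (dimensions : List Int) (out : List (List Int)) : Decidable (Spec_get_all_coords dimensions out) := by unfold Spec_get_all_coords; infer_instance

-- ===== CLAIM (what is proved, stated in full; the proofs are below) =====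
def Claim_equal_get_all_coords : Prop := ∀ (dimensions : List Int), Dom_get_all_coords dimensions → Pre_get_all_coords dimensions → Spec_get_all_coords dimensions (get_all_coords dimensions)

-- ===== LEMMAS AND PROOFS =====

-- Canonical lexicographic Cartesian product of the dimension list.
def pvProd : List Int → List (List Int)
  | [] => [[]]
  | d :: rest => (PySem.List.pyRange 0 d 1).flatMap (fun c => (pvProd rest).map (fun t => c :: t))

lemma pvProd_nodup (ds : List Int) : (pvProd ds).Nodup := by
  induction ds with
  | nil => simp [pvProd]
  | cons d rest ih =>
    rw [pvProd, List.nodup_flatMap]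
    refine ⟨fun c _ => ih.map (fun a b h => by simpa using h), ?_⟩
    have := PySem.List.pairwise_lt_pyRange_one (a := 0) (b := d)
    exact this.imp (fun {c c'} hlt => by
      intro x hx hx'
      simp only [List.mem_map] at hx hx'
      obtain ⟨t, _, rfl⟩ := hx
      obtain ⟨t', _, h⟩ := hx'
      exact absurd (List.cons.injEq .. ▸ h).1.symm (by omega))

-- The one combination step both programs share, written on the canonical product.
lemma flat_prod (d : Int) (ds : List Int) :
    ((PySem.List.pyRange 0 d 1).map (fun c => [c])).flatMap
        (fun t => (pvProd ds).map (fun u => t ++ u)) = pvProd (d :: ds) := by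
  simp [pvProd, List.flatMap_map]

-- A's nested set-insertion loops from the empty set are Set.update with the flattened products.
lemma foldl_foldl_add {α β γ : Type} [BEq γ] [LawfulBEq γ]
    (xs : List α) (ys : List β) (g : α → β → γ) (s : PySem.Set γ) :
    xs.foldl (fun s x => ys.foldl (fun s y => PySem.Set.add s (g x y)) s) s
      = PySem.Set.update s (xs.flatMap (fun x => ys.map (g x))) := by
  induction xs generalizing s with
  | nil => simp [PySem.Set.update]
  | cons x xs ih =>
    rw [List.foldl_cons, ih, ← PySem.Set.update_map_eq_foldl_add,
      List.flatMap_cons, PySem.Set.update_append]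

lemma mapRange_nodup (d : Int) : ((PySem.List.pyRange 0 d 1).map (fun c => [c] : Int → List Int)).Nodup :=
  (PySem.List.nodup_pyRange_one 0 d).map (fun a b h => by simpa using h)

lemma portA_base (d : Int) : get_all_coords [d] = (PySem.List.pyRange 0 d 1).map (fun c => [c]) := by
  rw [get_all_coords, ← PySem.Set.update_map_eq_foldl_add, PySem.Set.update_empty]
  exact PySem.Set.ofList_eq_self_of_nodup _ (mapRange_nodup d)

lemma prodRange (d : Int) : (PySem.List.pyRange 0 d 1).map (fun c => [c]) = pvProd [d] := by
  simp only [pvProd, List.map_nil, List.map_cons]; exact List.map_eq_flatMap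

lemma portA_eq_prod (ds : List Int) (h : ds ≠ []) : get_all_coords ds = pvProd ds := by
  match ds with
  | [d] => rw [portA_base, prodRange]
  | d :: e :: rest =>
    rw [get_all_coords, foldl_foldl_add, portA_base, portA_eq_prod (e :: rest) (by simp),
      PySem.Set.update_empty, flat_prod]
    exact PySem.Set.ofList_eq_self_of_nodup _ (pvProd_nodup _)
termination_by ds.length
decreasing_by all_goals (simp; try omega)

-- One step of B's loop on the canonical product.
lemma stepB (d : Int) (ds : List Int) :
    PySem.Set.ofList
        ((PySem.Set.ofList ((PySem.List.pyRange 0 d 1).map (fun c => [c]))).flatMap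
          (fun s => (pvProd ds).map (fun t => s ++ t))) = pvProd (d :: ds) := by
  rw [PySem.Set.ofList_eq_self_of_nodup _ (mapRange_nodup d), flat_prod]
  exact PySem.Set.ofList_eq_self_of_nodup _ (pvProd_nodup _)

-- B's loop invariant: folding the reversed remaining dimensions onto the canonical
-- product of the suffix yields the canonical product of the whole.
lemma inv_B (rs ds : List Int) :
    rs.foldl
        (fun coords d =>
          PySem.Set.ofList
            ((PySem.Set.ofList ((PySem.List.pyRange 0 d 1).map (fun c => [c]))).flatMap
              (fun s => coords.map (fun t => s ++ t))))
        (pvProd ds)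
      = pvProd (rs.reverse ++ ds) := by
  induction rs generalizing ds with
  | nil => simp
  | cons d rs ih =>
    rw [List.foldl_cons, stepB, ih]
    simp

-- min over foldl is a member of the list.
lemma foldl_min_mem (a : Int) (l : List Int) : l.foldl min a ∈ a :: l := by
  induction l generalizing a with
  | nil => simp
  | cons b l ih =>
    rw [List.foldl_cons]
    rcases List.mem_cons.1 (ih (min a b)) with h | h
    · rw [h]; rcases min_choice a b with hc | hc <;> simp [hc]
    · simp [List.mem_cons.2 (Or.inr h)]

-- A nonpositive dimension makes the canonical product empty.
lemma pvProd_nil_of_nonpos (ds : List Int) (h : ∃ d ∈ ds, d ≤ 0) : pvProd ds = [] := by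
  induction ds with
  | nil => simp at h
  | cons d rest ih =>
    obtain ⟨e, he, hle⟩ := h
    rcases List.mem_cons.1 he with rfl | he'
    · rw [pvProd, PySem.List.pyRange_one_eq_nil hle]; rfl
    · rw [pvProd, ih ⟨e, he', hle⟩]; simp

lemma portB_eq_prod (ds : List Int) (h : ds ≠ []) : get_all_coords_alt ds = pvProd ds := by
  match ds with
  | d0 :: rest =>
    rw [get_all_coords_alt]
    by_cases hmin : rest.foldl min d0 < 1
    · rw [if_pos hmin,
        pvProd_nil_of_nonpos _ ⟨rest.foldl min d0, foldl_min_mem d0 rest, by omega⟩]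
    · rw [if_neg hmin]
      match hrev : (d0 :: rest).reverse with
      | [] => exact absurd (by simpa using congrArg List.reverse hrev) h
      | dlast :: revInit =>
        have hds : d0 :: rest = revInit.reverse ++ [dlast] := by
          have := congrArg List.reverse hrev; simpa using this
        simp only []
        rw [PySem.Set.ofList_eq_self_of_nodup _ (mapRange_nodup dlast), prodRange, inv_B]
        rw [hds]

-- ===== VERDICT (by name: the statement is the Claim_ definition above) =====
theorem get_all_coords_spec : Claim_equal_get_all_coords := by
  intro ds _ hpre
  unfold Spec_get_all_coords
  rw [portA_eq_prod ds hpre, portB_eq_prod ds hpre]
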